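-- pv_equiv track=rewrite | github.com/zouyi777/py_nn_999 | seq2seq_直选.py | preLabels
-- ===== SOURCE A (Python) =====
-- def appendTo3(label_sequence_str):
--     label_sequence_str = str(label_sequence_str)
--     label_sequence = []
--     if len(label_sequence_str) == 1:  # 如果只有一位数，前面补两个0
--         pre_zero2 = [0, 0]
--         pre_zero2.append(int(label_sequence_str[0]))
--         label_sequence = pre_zero2
--     elif len(label_sequence_str) == 2:  # 如果只有两位数，前面补一个0
--         pre_zero1 = [0]
--         pre_zero1.append(int(label_sequence_str[0]))
--         pre_zero1.append(int(label_sequence_str[1]))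
--         label_sequence = pre_zero1
--     else:
--         label_sequence.append(int(label_sequence_str[0]))
--         label_sequence.append(int(label_sequence_str[1]))
--         label_sequence.append(int(label_sequence_str[2]))
--     return label_sequence
--
-- def preLabels(src_list,piece_len):
--     pre_labels = []
--     for j in range(len(src_list)-piece_len):
--         src = appendTo3(src_list[j + piece_len])
--         src.insert(0, 10)  # 开头添加10作为起始元素
--         src.append(11)  # 结尾添加11作为结束元素
--         pre_labels.append(src)
--     return pre_labels
-- ===== SOURCE B (Python) =====
-- def _trunc3(n):
--     # drop trailing decimal digits until at most three remain
--     while n >= 1000: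
--         n //= 10
--     return n
--
-- def preLabels(src_list, piece_len):
--     return [[10, t // 100, t // 10 % 10, t % 10, 11]
--             for t in map(_trunc3, src_list[piece_len:])]
-- ===== Notes on version B (the rewrite author's own statement) =====
-- stated objective: alternative
-- what changed: Replaced string formatting entirely: instead of converting each number to a string and branching/padding on its length, B extracts the first three decimal digits purely arithmetically (floor-divide by 10 until < 1000, then //100, //10%10, %10), mapping over the slice src_list[piece_len:] instead of an index loop.
-- outside the precondition, e.g. on preLabels([5], -1): A returns [[10, 0, 0, 5, 11], [10, 0, 0, 5, 11]], B returns [[10, 0, 0, 5, 11]]; on preLabels([-5], 0): A raises ValueError, B returns [[10, -1, 9, 5, 11]]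
import Mathlib
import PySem

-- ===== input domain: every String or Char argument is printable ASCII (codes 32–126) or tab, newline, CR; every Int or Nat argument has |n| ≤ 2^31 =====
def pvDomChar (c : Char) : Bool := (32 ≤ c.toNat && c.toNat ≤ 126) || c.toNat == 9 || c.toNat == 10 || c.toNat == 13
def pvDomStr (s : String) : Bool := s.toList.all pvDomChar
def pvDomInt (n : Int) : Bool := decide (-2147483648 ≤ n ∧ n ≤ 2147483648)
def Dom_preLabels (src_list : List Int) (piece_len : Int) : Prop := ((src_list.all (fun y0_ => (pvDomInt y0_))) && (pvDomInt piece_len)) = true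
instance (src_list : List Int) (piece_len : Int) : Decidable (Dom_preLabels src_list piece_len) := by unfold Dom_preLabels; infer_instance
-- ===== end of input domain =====

-- B drops string formatting altogether: it extracts the first three decimal digits of each
-- number arithmetically (floor-divide by 10 until < 1000, then //100, //10%10, %10) over the
-- slice src_list[piece_len:] (objective: alternative — arithmetic instead of string dispatch).

-- ===== PORT A =====
-- int(s[i]) made total: under Pre_ the index is always in range and the char a digit,
-- so neither getD default is ever used.
def pyDig (s : List Char) (i : Int) : Int :=
  (PySem.Int.ofChars? [(PySem.List.pyGet? s i).getD '0']).getD 0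

def appendTo3 (n : Int) : List Int :=
  let s := PySem.Int.toChars n
  if s.length = 1 then
    [0, 0] ++ [pyDig s 0]
  else if s.length = 2 then
    [0] ++ [pyDig s 0] ++ [pyDig s 1]
  else
    ([] ++ [pyDig s 0] ++ [pyDig s 1] ++ [pyDig s 2])

def preLabels (src_list : List Int) (piece_len : Int) : List (List Int) :=
  (PySem.List.pyRange 0 (PySem.List.len src_list - piece_len) 1).foldl
    (fun pre_labels j =>
      pre_labels ++ [(10 :: appendTo3 (PySem.List.pyGetD src_list (j + piece_len) 0)) ++ [11]])
    []

-- ===== PORT B =====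
-- while n >= 1000: n //= 10
def trunc3 (n : Int) : Int :=
  if _h : 1000 ≤ n then trunc3 (PySem.Int.floordiv n 10) else n
termination_by n.toNat
decreasing_by
  rw [PySem.Int.floordiv_eq_ediv_of_pos (by norm_num : (0:Int) < 10)]
  omega

def preLabels_alt (src_list : List Int) (piece_len : Int) : List (List Int) :=
  ((PySem.List.slice src_list (some piece_len) none).map trunc3).map
    (fun t => [10, PySem.Int.floordiv t 100,
               PySem.Int.mod (PySem.Int.floordiv t 10) 10,
               PySem.Int.mod t 10, 11])

-- ===== PRECONDITION & SPEC =====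
-- Pre_ restricts to the natural domain: a non-negative window length piece_len (Python's
-- negative-index wraparound for negative piece_len is outside the task's natural domain),
-- and non-negative numbers in the window (A raises ValueError on int('-') otherwise).
def Pre_preLabels (src_list : List Int) (piece_len : Int) : Prop :=
  0 ≤ piece_len ∧ ∀ n ∈ src_list.drop piece_len.toNat, 0 ≤ n
instance (src_list : List Int) (piece_len : Int) : Decidable (Pre_preLabels src_list piece_len) := by
  unfold Pre_preLabels; infer_instance

def pvWitness_preLabels : List Int × Int := ([100, 7, 23, 1234], 1)

def Spec_preLabels (src_list : List Int) (piece_len : Int) (out : List (List Int)) : Prop := out = preLabels_alt src_list piece_len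
instance (src_list : List Int) (piece_len : Int) (out : List (List Int)) : Decidable (Spec_preLabels src_list piece_len out) := by unfold Spec_preLabels; infer_instance

-- ===== CLAIM (what is proved, stated in full; the proofs are below) =====
def Claim_equal_preLabels : Prop := ∀ (src_list : List Int) (piece_len : Int), Dom_preLabels src_list piece_len → Pre_preLabels src_list piece_len → Spec_preLabels src_list piece_len (preLabels src_list piece_len)

-- ===== LEMMAS AND PROOFS =====

-- the decimal digit characters of m, most significant first (= str(m) for m ≥ 0)
def decChars (m : Nat) : List Char :=
  if _h : m < 10 then [Nat.digitChar m]
  else decChars (m / 10) ++ [Nat.digitChar (m % 10)]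
termination_by m
decreasing_by exact Nat.div_lt_self (by omega) (by omega)

lemma toDigitsCore_eq_decChars :
    ∀ (f m : Nat) (ds : List Char), m < f →
      Nat.toDigitsCore 10 f m ds = decChars m ++ ds := by
  intro f
  induction f with
  | zero => intro m ds h; omega
  | succ f ih =>
    intro m ds h
    simp only [Nat.toDigitsCore]
    by_cases h10 : m / 10 = 0
    · rw [if_pos h10, decChars, dif_pos (by omega)]
      have : m % 10 = m := by omega
      rw [this]
      rfl
    · have hml : m / 10 < f := by omega
      rw [if_neg h10, ih (m / 10) _ hml]
      conv_rhs => rw [decChars]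
      rw [dif_neg (by omega), List.append_assoc]
      rfl

lemma toChars_nonneg (n : Int) (hn : 0 ≤ n) :
    PySem.Int.toChars n = decChars n.toNat := by
  unfold PySem.Int.toChars
  rw [if_neg (by omega)]
  have := toDigitsCore_eq_decChars (n.toNat + 1) n.toNat [] (by omega)
  simpa [Nat.toDigits] using this

lemma ofChars_digitChar (a : Nat) (h : a < 10) :
    (PySem.Int.ofChars? [Nat.digitChar a]).getD 0 = (a : Int) := by
  interval_cases a <;> decide

lemma decChars_len_pos : ∀ m : Nat, 1 ≤ (decChars m).length := by
  intro m
  rw [decChars]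
  split
  · simp
  · simp

lemma decChars_len_two (m : Nat) (h : 10 ≤ m) : 2 ≤ (decChars m).length := by
  rw [decChars, dif_neg (by omega)]
  have := decChars_len_pos (m / 10)
  simp only [List.length_append, List.length_singleton]
  omega

lemma decChars_len_three (m : Nat) (h : 100 ≤ m) : 3 ≤ (decChars m).length := by
  rw [decChars, dif_neg (by omega)]
  have := decChars_len_two (m / 10) (by omega)
  simp only [List.length_append, List.length_singleton]
  omega

lemma pyDig_append (s : List Char) (c : Char) (i : Int)
    (h0 : 0 ≤ i) (h1 : i < s.length) : pyDig (s ++ [c]) i = pyDig s i := by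
  unfold pyDig PySem.List.pyGet? PySem.List.pyIdx?
  rw [List.length_append]
  simp only [List.length_singleton]
  rw [if_pos h0, if_pos h0, if_pos (by push_cast; omega), if_pos (by omega)]
  simp only [Option.bind_some]
  rw [List.getElem?_append_left (by omega)]

lemma trunc3_small (n : Int) (h : n < 1000) : trunc3 n = n := by
  rw [trunc3, dif_neg (by omega)]

lemma trunc3_step (n : Int) (h : 1000 ≤ n) :
    trunc3 n = trunc3 (PySem.Int.floordiv n 10) := by
  rw [trunc3, dif_pos h]

-- core fact: A's string-dispatch digits equal B's arithmetic digits, for every m ≥ 0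
lemma appendTo3_eq_arith (m : Nat) :
    appendTo3 (m : Int) =
      [PySem.Int.floordiv (trunc3 m) 100,
       PySem.Int.mod (PySem.Int.floordiv (trunc3 m) 10) 10,
       PySem.Int.mod (trunc3 m) 10] := by
  have f100 : ∀ a : Int, PySem.Int.floordiv a 100 = a / 100 :=
    fun a => PySem.Int.floordiv_eq_ediv_of_pos (by norm_num)
  have f10 : ∀ a : Int, PySem.Int.floordiv a 10 = a / 10 :=
    fun a => PySem.Int.floordiv_eq_ediv_of_pos (by norm_num)
  have m10 : ∀ a : Int, PySem.Int.mod a 10 = a % 10 :=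
    fun a => PySem.Int.mod_eq_emod_of_pos (by norm_num)
  induction m using Nat.strong_induction_on with
  | _ m ih =>
    have htc : PySem.Int.toChars (m : Int) = decChars m := by
      rw [toChars_nonneg _ (by positivity)]; simp only [Int.toNat_natCast]
    by_cases h1 : m < 10
    · -- one digit: str(m) = [d]
      have hd : decChars m = [Nat.digitChar m] := by rw [decChars, dif_pos h1]
      simp only [appendTo3]
      rw [htc, hd, if_pos (by simp)]
      have hp : pyDig [Nat.digitChar m] 0 = (m : Int) := by
        unfold pyDig PySem.List.pyGet? PySem.List.pyIdx?
        norm_num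
        exact ofChars_digitChar m h1
      rw [hp, trunc3_small _ (by omega), f100, f10, m10, m10]
      simp only [List.cons_append, List.nil_append, List.cons.injEq, and_true]
      refine ⟨by omega, by omega, by omega⟩
    · by_cases h2 : m < 100
      · -- two digits
        have hd : decChars m = [Nat.digitChar (m / 10), Nat.digitChar (m % 10)] := by
          rw [decChars, dif_neg (by omega), decChars, dif_pos (by omega)]
          rfl
        simp only [appendTo3]
        rw [htc, hd, if_neg (by simp), if_pos (by simp)]
        have hp0 : pyDig [Nat.digitChar (m / 10), Nat.digitChar (m % 10)] 0
            = ((m / 10 : Nat) : Int) := by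
          unfold pyDig PySem.List.pyGet? PySem.List.pyIdx?
          norm_num
          exact ofChars_digitChar (m / 10) (by omega)
        have hp1 : pyDig [Nat.digitChar (m / 10), Nat.digitChar (m % 10)] 1
            = ((m % 10 : Nat) : Int) := by
          unfold pyDig PySem.List.pyGet? PySem.List.pyIdx?
          norm_num
          exact ofChars_digitChar (m % 10) (by omega)
        rw [hp0, hp1, trunc3_small _ (by omega), f100, f10, m10, m10]
        simp only [List.cons_append, List.nil_append, List.cons.injEq, and_true]
        refine ⟨by omega, by omega, by omega⟩
      · by_cases h3 : m < 1000
        · -- three digits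
          have hd : decChars m =
              [Nat.digitChar (m / 10 / 10), Nat.digitChar (m / 10 % 10), Nat.digitChar (m % 10)] := by
            rw [decChars, dif_neg (by omega)]
            conv_lhs => rw [decChars]
            rw [dif_neg (by omega)]
            conv_lhs => rw [decChars]
            rw [dif_pos (by omega)]
            rfl
          simp only [appendTo3]
          rw [htc, hd, if_neg (by simp), if_neg (by simp)]
          have hp0 : pyDig [Nat.digitChar (m / 10 / 10), Nat.digitChar (m / 10 % 10),
              Nat.digitChar (m % 10)] 0 = ((m / 10 / 10 : Nat) : Int) := by
            unfold pyDig PySem.List.pyGet? PySem.List.pyIdx?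
            norm_num
            exact ofChars_digitChar (m / 10 / 10) (by omega)
          have hp1 : pyDig [Nat.digitChar (m / 10 / 10), Nat.digitChar (m / 10 % 10),
              Nat.digitChar (m % 10)] 1 = ((m / 10 % 10 : Nat) : Int) := by
            unfold pyDig PySem.List.pyGet? PySem.List.pyIdx?
            norm_num
            exact ofChars_digitChar (m / 10 % 10) (by omega)
          have hp2 : pyDig [Nat.digitChar (m / 10 / 10), Nat.digitChar (m / 10 % 10),
              Nat.digitChar (m % 10)] 2 = ((m % 10 : Nat) : Int) := by
            unfold pyDig PySem.List.pyGet? PySem.List.pyIdx?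
            norm_num
            exact ofChars_digitChar (m % 10) (by omega)
          rw [hp0, hp1, hp2, trunc3_small _ (by omega), f100, f10, m10, m10]
          simp only [List.cons_append, List.nil_append, List.cons.injEq, and_true]
          refine ⟨by omega, by omega, by omega⟩
        · -- four or more digits: str(m)[:3] = str(m//10)[:3], trunc3 m = trunc3 (m//10)
          have hfd : PySem.Int.floordiv (m : Int) 10 = ((m / 10 : Nat) : Int) := by
            rw [f10]; omega
          have htr : trunc3 (m : Int) = trunc3 ((m / 10 : Nat) : Int) := by
            rw [trunc3_step _ (by omega), hfd]
          have hd : decChars m = decChars (m / 10) ++ [Nat.digitChar (m % 10)] := by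
            conv_lhs => rw [decChars]
            rw [dif_neg (by omega)]
          have hlen : 3 ≤ (decChars (m / 10)).length :=
            decChars_len_three (m / 10) (by omega)
          have htc' : PySem.Int.toChars ((m / 10 : Nat) : Int) = decChars (m / 10) := by
            rw [toChars_nonneg _ (by positivity)]; simp only [Int.toNat_natCast]
          have hA : appendTo3 (m : Int) = appendTo3 ((m / 10 : Nat) : Int) := by
            simp only [appendTo3]
            rw [htc, htc', hd]
            have hl : (decChars (m / 10) ++ [Nat.digitChar (m % 10)]).length
                = (decChars (m / 10)).length + 1 := by simp
            rw [hl]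
            rw [if_neg (by omega), if_neg (by omega), if_neg (by omega), if_neg (by omega)]
            rw [pyDig_append _ _ 0 (by norm_num) (by exact_mod_cast by omega),
                pyDig_append _ _ 1 (by norm_num) (by exact_mod_cast by omega),
                pyDig_append _ _ 2 (by norm_num) (by exact_mod_cast by omega)]
          rw [hA, htr]
          exact ih (m / 10) (Nat.div_lt_self (by omega) (by omega))

-- ===== VERDICT (by name: the statement is the Claim_ definition above) =====
theorem preLabels_spec : Claim_equal_preLabels := by
  intro src_list piece_len _hDom hPre
  obtain ⟨hp, hnn⟩ := hPre
  unfold Spec_preLabels preLabels preLabels_alt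
  rw [PySem.List.foldl_append_singleton_eq_map, List.nil_append,
      PySem.List.slice_from src_list hp, ← PySem.List.map_pyGetD_pyRange src_list 0 hp,
      PySem.List.pyRange_one, PySem.List.pyRange_one, List.map_map, List.map_map,
      List.map_map, List.map_map]
  have hsub : ((PySem.List.len src_list - piece_len) - 0) = PySem.List.len src_list - piece_len := by ring
  rw [hsub]
  apply List.map_congr_left
  intro k hk
  simp only [Function.comp]
  have hkN : k < (PySem.List.len src_list - piece_len).toNat := List.mem_range.mp hk
  have hlen : PySem.List.len src_list = (src_list.length : Int) := PySem.List.len_eq src_list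
  have h0 : (0:Int) ≤ piece_len + (k:Int) := by omega
  have h1 : piece_len + (k:Int) < (src_list.length : Int) := by omega
  have hdrop : k < (src_list.drop piece_len.toNat).length := by
    simp only [List.length_drop]; omega
  have hx : 0 ≤ PySem.List.pyGetD src_list (piece_len + (k:Int)) 0 := by
    rw [PySem.List.pyGetD_eq_getElem src_list 0 h0 (by omega)]
    have e2 : src_list[(piece_len + (k:Int)).toNat]'(by omega) =
        (src_list.drop piece_len.toNat)[k]'hdrop := by
      rw [List.getElem_drop]
      congr 1
      omega
    rw [e2]
    exact hnn _ (List.getElem_mem hdrop)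
  have hidx : ((0:Int) + (k:Int)) + piece_len = piece_len + (k:Int) := by ring
  rw [hidx]
  set x := PySem.List.pyGetD src_list (piece_len + (k:Int)) 0 with hxdef
  have hxc : x = ((x.toNat : Nat) : Int) := by omega
  rw [hxc, appendTo3_eq_arith x.toNat]
  rfl
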